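-- pv_equiv track=rewrite | github.com/rodrigokazu/FootSim_Validation | validation_toolbox.py | sort_afferent_data
-- ===== SOURCE A (Python) =====
-- def sort_afferent_data(afferent_data):
--     """ Sorts afferent_data dictionary so that classes are grouped within regions
--
--     Args:
--         afferent_data:
--
--     Returns:
--         sorted_afferent_data (dict): Region: Class: (Model ID, model index)
--
--     """
--
--     # initialise dictionary
--     sorted_afferent_data = dict()
--
--     # afferent classes
--     classes = ['FA1','FA2','SA1','SA2']
--
--     # loop through regions
--     for region in afferent_data:
--
--         sorted_afferent_data[region] = dict()
--
--         # loop through afferent classes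
--         for affClass in classes:
--
--             sorted_afferent_data[region][affClass] = list()
--
--             for i in range(len(afferent_data[region])):
--
--                 if afferent_data[region][i][1] == affClass:
--
--                     sorted_afferent_data[region][affClass].append([afferent_data[region][i][0], afferent_data[region][i][2]])
--
--                 else:
--                     continue
--
--     return sorted_afferent_data
-- ===== SOURCE B (Python) =====
-- def _bucketize(items):
--     """Single pass: pre-built class buckets in fixed order; unknown classes dropped."""
--     buckets = {c: [] for c in ('FA1', 'FA2', 'SA1', 'SA2')}
--     for item in items:
--         if item[1] in buckets:
--             buckets[item[1]].append([item[0], item[2]])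
--     return buckets
--
--
-- def sort_afferent_data(afferent_data):
--     """ Sorts afferent_data dictionary so that classes are grouped within regions """
--     return {region: _bucketize(items) for region, items in afferent_data.items()}
-- ===== Notes on version B (the rewrite author's own statement) =====
-- stated objective: simpler
-- what changed: A rescans each region's list once per class (4 nested passes with range indexing); B pre-builds the four class buckets and fills them in a single pass per region, dropping unknown classes by a membership test.
import Mathlib
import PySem

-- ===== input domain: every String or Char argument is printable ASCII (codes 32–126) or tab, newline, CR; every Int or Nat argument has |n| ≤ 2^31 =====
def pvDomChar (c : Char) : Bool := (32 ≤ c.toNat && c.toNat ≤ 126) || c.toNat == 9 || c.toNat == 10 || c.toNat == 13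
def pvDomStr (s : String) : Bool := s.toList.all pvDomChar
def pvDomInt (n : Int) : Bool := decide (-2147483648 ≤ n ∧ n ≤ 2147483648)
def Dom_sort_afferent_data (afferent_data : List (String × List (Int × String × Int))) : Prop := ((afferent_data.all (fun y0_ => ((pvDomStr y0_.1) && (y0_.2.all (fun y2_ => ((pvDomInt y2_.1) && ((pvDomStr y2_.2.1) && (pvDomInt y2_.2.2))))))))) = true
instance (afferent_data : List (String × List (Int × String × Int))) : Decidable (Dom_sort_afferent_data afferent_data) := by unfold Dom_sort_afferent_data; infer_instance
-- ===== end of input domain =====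

-- B replaces A's four per-class rescans of each region's list by a single pass into
-- pre-built class buckets (objective: simpler); return values proved equal on Pre_.

-- ===== PORT A =====
-- literal transliteration of A: for each region, for each of the four classes,
-- scan range(len(items)) and append [id, index] on a class match; dicts are PySem.Dict.
def sort_afferent_data (afferent_data : List (String × List (Int × String × Int))) : List (String × List (String × List (List Int))) :=
  (afferent_data.foldl
    (fun sorted rp =>
      sorted.insert rp.1
        ((["FA1", "FA2", "SA1", "SA2"].foldl
          (fun d affClass =>
            d.insert affClass
              ((PySem.List.pyRange 0 (((PySem.Dict.mk afferent_data).getD rp.1 []).length : Int) 1).foldl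
                (fun l i =>
                  if (PySem.List.pyGetD ((PySem.Dict.mk afferent_data).getD rp.1 []) i (0, "", 0)).2.1 == affClass
                  then l ++ [[(PySem.List.pyGetD ((PySem.Dict.mk afferent_data).getD rp.1 []) i (0, "", 0)).1,
                              (PySem.List.pyGetD ((PySem.Dict.mk afferent_data).getD rp.1 []) i (0, "", 0)).2.2]]
                  else l)
                []))
          PySem.Dict.empty).items))
    (PySem.Dict.empty : PySem.Dict String (List (String × List (List Int))))).items

-- ===== PORT B =====
-- transliteration of Source B's _bucketize: buckets = {c: [] for c in the literal classes},
-- then one pass appending on membership.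
def pvBucketize (items : List (Int × String × Int)) : List (String × List (List Int)) :=
  (items.foldl
    (fun buckets item =>
      if buckets.contains item.2.1
      then buckets.modify item.2.1 [] (fun l => l ++ [[item.1, item.2.2]])
      else buckets)
    (PySem.Dict.mk [("FA1", []), ("FA2", []), ("SA1", []), ("SA2", [])])).items

def sort_afferent_data_alt (afferent_data : List (String × List (Int × String × Int))) : List (String × List (String × List (List Int))) :=
  afferent_data.map (fun rp => (rp.1, pvBucketize rp.2))

-- ===== PRECONDITION & SPEC =====
-- Pre_ excludes association lists with duplicate region keys: A's parameter is a Python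
-- dict, which cannot carry duplicates, so the list encoding is ambiguous there.
def Pre_sort_afferent_data (afferent_data : List (String × List (Int × String × Int))) : Prop :=
  (afferent_data.map Prod.fst).Nodup
instance (afferent_data : List (String × List (Int × String × Int))) : Decidable (Pre_sort_afferent_data afferent_data) := by unfold Pre_sort_afferent_data; infer_instance

def pvWitness_sort_afferent_data : (List (String × List (Int × String × Int))) :=
  [("S1", [(1, "SA1", 0), (2, "FA1", 3), (3, "XX", 4), (4, "FA1", 5)]), ("S2", [])]

def Spec_sort_afferent_data (afferent_data : List (String × List (Int × String × Int))) (out : List (String × List (String × List (List Int)))) : Prop := out = sort_afferent_data_alt afferent_data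
instance (afferent_data : List (String × List (Int × String × Int))) (out : List (String × List (String × List (List Int)))) : Decidable (Spec_sort_afferent_data afferent_data out) := by unfold Spec_sort_afferent_data; infer_instance

-- ===== CLAIM (what is proved, stated in full; the proofs are below) =====
def Claim_equal_sort_afferent_data : Prop := ∀ (afferent_data : List (String × List (Int × String × Int))), Dom_sort_afferent_data afferent_data → Pre_sort_afferent_data afferent_data → Spec_sort_afferent_data afferent_data (sort_afferent_data afferent_data)

-- ===== LEMMAS AND PROOFS =====

-- the per-class slice both sides compute
def pvClassList (items : List (Int × String × Int)) (c : String) : List (List Int) :=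
  (items.filter (fun it => it.2.1 == c)).map (fun it => [it.1, it.2.2])

-- A's innermost range loop is the filtered-map for that class
lemma aInner_eq (items : List (Int × String × Int)) (c : String) :
    (PySem.List.pyRange 0 (items.length : Int) 1).foldl
      (fun l i =>
        if (PySem.List.pyGetD items i (0, "", 0)).2.1 == c
        then l ++ [[(PySem.List.pyGetD items i (0, "", 0)).1,
                    (PySem.List.pyGetD items i (0, "", 0)).2.2]]
        else l)
      [] = pvClassList items c := by
  have h := PySem.List.foldl_pyRange_pyGetD' (xs := items) (a := 0) (d := (0, "", 0))
    (f := fun (l : List (List Int)) it => if it.2.1 == c then l ++ [[it.1, it.2.2]] else l)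
    (init := ([] : List (List Int))) le_rfl
  simp only [Int.toNat_zero, List.drop_zero] at h
  rw [h, PySem.List.foldl_append_if (fun it => it.2.1 == c) (fun it => [it.1, it.2.2]) items []]
  simp [pvClassList]

-- B's single pass, with the four literal buckets generalised
lemma bucketFold_items (items : List (Int × String × Int)) :
    ∀ l1 l2 l3 l4 : List (List Int),
    (items.foldl
      (fun buckets item =>
        if buckets.contains item.2.1
        then buckets.modify item.2.1 [] (fun l => l ++ [[item.1, item.2.2]])
        else buckets)
      (PySem.Dict.mk [("FA1", l1), ("FA2", l2), ("SA1", l3), ("SA2", l4)])).items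
    = [("FA1", l1 ++ pvClassList items "FA1"), ("FA2", l2 ++ pvClassList items "FA2"),
       ("SA1", l3 ++ pvClassList items "SA1"), ("SA2", l4 ++ pvClassList items "SA2")] := by
  induction items with
  | nil => intro l1 l2 l3 l4; simp [pvClassList]
  | cons it rest ih =>
    intro l1 l2 l3 l4
    obtain ⟨a, c, b⟩ := it
    by_cases h1 : c = "FA1"
    · subst h1; simpa [pvClassList, List.foldl_cons, PySem.Dict.contains,
        PySem.Dict.modify, List.append_assoc] using ih (l1 ++ [[a, b]]) l2 l3 l4
    · by_cases h2 : c = "FA2"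
      · subst h2; simpa [pvClassList, List.foldl_cons, PySem.Dict.contains,
          PySem.Dict.modify, List.append_assoc] using ih l1 (l2 ++ [[a, b]]) l3 l4
      · by_cases h3 : c = "SA1"
        · subst h3; simpa [pvClassList, List.foldl_cons, PySem.Dict.contains,
            PySem.Dict.modify, List.append_assoc] using ih l1 l2 (l3 ++ [[a, b]]) l4
        · by_cases h4 : c = "SA2"
          · subst h4; simpa [pvClassList, List.foldl_cons, PySem.Dict.contains,
              PySem.Dict.modify, List.append_assoc] using ih l1 l2 l3 (l4 ++ [[a, b]])
          · have hc : (PySem.Dict.mk [("FA1", l1), ("FA2", l2), ("SA1", l3), ("SA2", l4)]).contains c = false := by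
              simp only [PySem.Dict.contains_mk, List.any_cons, List.any_nil, Bool.or_false,
                Bool.or_eq_false_iff, beq_eq_false_iff_ne]
              exact ⟨Ne.symm h1, Ne.symm h2, Ne.symm h3, Ne.symm h4⟩
            simp only [List.foldl_cons, hc, Bool.false_eq_true, if_false]
            rw [ih l1 l2 l3 l4]
            simp [pvClassList, h1, h2, h3, h4]

lemma pvBucketize_eq (items : List (Int × String × Int)) :
    pvBucketize items
    = [("FA1", pvClassList items "FA1"), ("FA2", pvClassList items "FA2"),
       ("SA1", pvClassList items "SA1"), ("SA2", pvClassList items "SA2")] := by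
  simpa using bucketFold_items items [] [] [] []

-- ===== VERDICT (by name: the statement is the Claim_ definition above) =====
theorem sort_afferent_data_spec : Claim_equal_sort_afferent_data := by
  intro ad _ hpre
  unfold Spec_sort_afferent_data sort_afferent_data sort_afferent_data_alt
  have hnd : (ad.map Prod.fst).Nodup := hpre
  rw [PySem.Dict.items_foldl_insert_fresh
      (l := ad)
      (d := PySem.Dict.empty)
      (k := Prod.fst)
      (v := fun rp => (["FA1", "FA2", "SA1", "SA2"].foldl
          (fun d affClass =>
            d.insert affClass
              ((PySem.List.pyRange 0 (((PySem.Dict.mk ad).getD rp.1 []).length : Int) 1).foldl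
                (fun l i =>
                  if (PySem.List.pyGetD ((PySem.Dict.mk ad).getD rp.1 []) i (0, "", 0)).2.1 == affClass
                  then l ++ [[(PySem.List.pyGetD ((PySem.Dict.mk ad).getD rp.1 []) i (0, "", 0)).1,
                              (PySem.List.pyGetD ((PySem.Dict.mk ad).getD rp.1 []) i (0, "", 0)).2.2]]
                  else l)
                []))
          PySem.Dict.empty).items)
      (by simp [PySem.Dict.contains_empty]) hnd]
  simp only [PySem.Dict.empty, List.nil_append]
  apply List.map_congr_left
  intro rp hmem
  have hget : (PySem.Dict.mk ad).getD rp.1 [] = rp.2 := by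
    apply PySem.Dict.getD_of_mem_items
    · exact hmem
    · exact hnd
  rw [hget]
  refine Prod.ext rfl ?_
  show _ = pvBucketize rp.2
  rw [pvBucketize_eq]
  simp only [List.foldl_cons, List.foldl_nil, aInner_eq]
  rfl
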